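-- pv_equiv track=rewrite | github.com/HeyLucasLeao/URI | 1557.py | mat
-- ===== SOURCE A (Python) =====
-- def mat(x):
--     array = []
--     nested_list = []
--     for i in range(x):
--         nested_list.append([])
--         for j in range(x):
--             nested_list[i].append(1)
--     array.extend(nested_list)
--     return sum_interior(x, array)
--
-- def sum_interior(x, array):
--     if len(array) > 1:
--         k = 2
--         for i in range(1, x):
--             array[i][0] *= k
--             array[0][i] *= k
--             k *= 2
--         for i in range(1, x):
--             array[-1][i] *= array[-1][i - 1] * 2
--         for i in range(1, x - 1):
--             for j in range(1, x):
--                 array[i][j] *= array[i][j - 1] * 2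
--     return array
-- ===== SOURCE B (Python) =====
-- def mat(x):
--     return [[2 ** (i + j) for j in range(x)] for i in range(x)]
-- ===== Notes on version B (the rewrite author's own statement) =====
-- stated objective: simpler
-- what changed: Each cell is computed independently by its closed form 2**(i+j) instead of seeding row/column 0 with running doublings and propagating neighbour products across three differently-shaped mutation passes.
import Mathlib
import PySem

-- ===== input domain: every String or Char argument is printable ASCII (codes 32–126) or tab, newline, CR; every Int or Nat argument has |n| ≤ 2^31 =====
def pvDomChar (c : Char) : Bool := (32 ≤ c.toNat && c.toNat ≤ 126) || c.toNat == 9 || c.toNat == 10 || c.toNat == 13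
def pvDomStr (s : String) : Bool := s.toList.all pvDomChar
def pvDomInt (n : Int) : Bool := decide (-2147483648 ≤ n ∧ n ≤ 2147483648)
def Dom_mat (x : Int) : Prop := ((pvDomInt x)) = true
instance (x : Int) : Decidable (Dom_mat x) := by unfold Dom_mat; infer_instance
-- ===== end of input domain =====

-- B computes each cell by its closed form 2^(i+j) instead of A's three passes of
-- incremental-doubling propagation (objective: simpler). A mutates its local list only;
-- the equivalence is about the return value.

-- ===== PORT A =====
-- Python's sum_interior mutates `array` (a Python list of lists) in place; Python lists are
-- ported as Lean Arrays (O(1) index assignment / append, matching Python), returned as List.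
-- In the loops below i,j ≥ 1, so (i-1).toNat is exactly Python's in-range index i-1.
def sum_interior (x : Int) (array : Array (Array Int)) : Array (Array Int) :=
  if array.size > 1 then
    -- k = 2; for i in range(1, x): array[i][0] *= k; array[0][i] *= k; k *= 2
    let s1 := (PySem.List.pyRange 1 x 1).foldl
      (fun (p : Array (Array Int) × Int) i =>
        let a := p.1.modify i.toNat (fun r => r.modify 0 (fun v => v * p.2))
        let a := a.modify 0 (fun r => r.modify i.toNat (fun v => v * p.2))
        (a, p.2 * 2)) (array, 2)
    -- for i in range(1, x): array[-1][i] *= array[-1][i-1] * 2   (array[-1] = last row; nonempty here)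
    let a2 := (PySem.List.pyRange 1 x 1).foldl
      (fun a i => a.modify (a.size - 1)
        (fun r => r.modify i.toNat (fun v => v * (r.getD (i - 1).toNat 0 * 2)))) s1.1
    -- for i in range(1, x-1): for j in range(1, x): array[i][j] *= array[i][j-1] * 2
    (PySem.List.pyRange 1 (x - 1) 1).foldl
      (fun a i => (PySem.List.pyRange 1 x 1).foldl
        (fun a j => a.modify i.toNat
          (fun r => r.modify j.toNat (fun v => v * (r.getD (j - 1).toNat 0 * 2)))) a) a2
  else array

def mat (x : Int) : List (List Int) :=
  let nested_list := (PySem.List.pyRange 0 x 1).foldl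
    (fun nl i =>
      let nl' := nl.push #[]
      (PySem.List.pyRange 0 x 1).foldl (fun nl _j => nl.modify i.toNat (fun r => r.push 1)) nl')
    #[]
  let array := #[] ++ nested_list
  ((sum_interior x array).toList.map Array.toList)

-- ===== PORT B =====
def mat_alt (x : Int) : List (List Int) :=
  (PySem.List.pyRange 0 x 1).map (fun i =>
    (PySem.List.pyRange 0 x 1).map (fun j => 2 ^ (i + j).toNat))

-- ===== PRECONDITION & SPEC =====
def Spec_mat (x : Int) (out : List (List Int)) : Prop := out = mat_alt x
instance (x : Int) (out : List (List Int)) : Decidable (Spec_mat x out) := by unfold Spec_mat; infer_instance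

-- ===== CLAIM (what is proved, stated in full; the proofs are below) =====
def Claim_equal_mat : Prop := ∀ (x : Int), Dom_mat x → Spec_mat x (mat x)

-- ===== LEMMAS AND PROOFS =====

-- proof-only: the same algorithm over Lists, and a simulation Array -> List
-- Python's sum_interior mutates `array` in place; ported as a pure function on the list.
def sum_interiorL (x : Int) (array : List (List Int)) : List (List Int) :=
  if array.length > 1 then
    -- k = 2; for i in range(1, x): array[i][0] *= k; array[0][i] *= k; k *= 2
    let s1 := (PySem.List.pyRange 1 x 1).foldl
      (fun (p : List (List Int) × Int) i =>
        let a := p.1.modify i.toNat (fun r => r.modify 0 (fun v => v * p.2))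
        let a := a.modify 0 (fun r => r.modify i.toNat (fun v => v * p.2))
        (a, p.2 * 2)) (array, 2)
    -- for i in range(1, x): array[-1][i] *= array[-1][i-1] * 2
    -- array[-1] is the last row: array is nonempty in this branch, so index length-1 is exact
    let a2 := (PySem.List.pyRange 1 x 1).foldl
      (fun a i => a.modify (a.length - 1)
        (fun r => r.modify i.toNat (fun v => v * (PySem.List.pyGetD r (i - 1) 0 * 2)))) s1.1
    -- for i in range(1, x-1): for j in range(1, x): array[i][j] *= array[i][j-1] * 2
    (PySem.List.pyRange 1 (x - 1) 1).foldl
      (fun a i => (PySem.List.pyRange 1 x 1).foldl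
        (fun a j => a.modify i.toNat
          (fun r => r.modify j.toNat (fun v => v * (PySem.List.pyGetD r (j - 1) 0 * 2)))) a) a2
  else array

def matL (x : Int) : List (List Int) :=
  let nested_list := (PySem.List.pyRange 0 x 1).foldl
    (fun nl i =>
      let nl' := nl ++ [([] : List Int)]
      (PySem.List.pyRange 0 x 1).foldl (fun nl _j => nl.modify i.toNat (fun r => r ++ [1])) nl')
    []
  let array := ([] : List (List Int)) ++ nested_list
  sum_interiorL x array

def sim (A : Array (Array Int)) : List (List Int) := A.toList.map Array.toList

theorem map_modify_comm {a b : Type} (l : List a) (k : Nat) (f : a -> a) (f' : b -> b)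
    (g : a -> b) (h : forall x, g (f x) = f' (g x)) :
    (l.modify k f).map g = (l.map g).modify k f' := by
  apply List.ext_getElem (by simp)
  intro i h1 h2
  simp only [List.getElem_map, List.getElem_modify]
  split_ifs <;> simp [h]

theorem sim_modify (A : Array (Array Int)) (k : Nat) (f : Array Int -> Array Int)
    (f' : List Int -> List Int) (h : forall r, (f r).toList = f' r.toList) :
    sim (A.modify k f) = (sim A).modify k f' := by
  simp only [sim, Array.toList_modify]
  exact map_modify_comm _ k f f' Array.toList h

theorem arr_getD (a : Array Int) (i : Nat) : a.getD i 0 = a.toList.getD i 0 := by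
  rcases Nat.lt_or_ge i a.size with hl | hl
  · simp [Array.getD, hl, List.getD_eq_getElem?_getD, List.getElem?_eq_getElem,
      (by simpa using hl : i < a.toList.length), Array.getElem_toList]
  · simp [Array.getD, Nat.not_lt.mpr hl, List.getD_eq_getElem?_getD,
      List.getElem?_eq_none (by simpa using hl)]

theorem foldl_sim {s t b : Type} (R : s -> t -> Prop) (js : List b)
    (fA : s -> b -> s) (fL : t -> b -> t)
    (h : forall j, j ∈ js -> forall u v, R u v -> R (fA u j) (fL v j)) :
    forall u v, R u v -> R (js.foldl fA u) (js.foldl fL v) := by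
  induction js with
  | nil => intro u v huv; exact huv
  | cons j js ih =>
    intro u v huv
    simp only [List.foldl_cons]
    exact ih (fun j hj u v huv => h j (List.mem_cons_of_mem _ hj) u v huv)
      _ _ (h j (List.mem_cons_self) u v huv)

theorem mat_eq_matL (x : Int) : mat x = matL x := by
  simp only [mat, matL]
  have hbuild : sim ((PySem.List.pyRange 0 x 1).foldl
      (fun nl i =>
        (PySem.List.pyRange 0 x 1).foldl (fun nl _j => nl.modify i.toNat (fun r => r.push 1))
          (nl.push #[]))
      #[])
      = (PySem.List.pyRange 0 x 1).foldl
      (fun nl i =>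
        (PySem.List.pyRange 0 x 1).foldl (fun nl _j => nl.modify i.toNat (fun r => r ++ [1]))
          (nl ++ [([] : List Int)]))
      [] := by
    apply foldl_sim (fun A L => sim A = L)
    · intro i _ u v huv
      apply foldl_sim (fun A L => sim A = L)
      · intro j _ u v huv
        rw [<- huv]
        exact sim_modify u i.toNat _ _ (fun r => Array.toList_push)
      · rw [<- huv]
        simp [sim, Array.toList_push]
    · rfl
  have foldl_pres : forall {σ β : Type} (P : σ -> Prop) (js : List β) (f : σ -> β -> σ),
      (forall j u, P u -> P (f u j)) -> forall u, P u -> P (js.foldl f u) := by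
    intro σ β P js f h
    induction js with
    | nil => intro u hu; exact hu
    | cons j js ih => intro u hu; exact ih _ (h j u hu)
  have hsum : forall (A : Array (Array Int)) (L : List (List Int)), sim A = L ->
      sim (sum_interior x A) = sum_interiorL x L := by
    intro A L hAL
    have hlen : L.length = A.size := by rw [<- hAL]; simp [sim]
    simp only [sum_interior, sum_interiorL, hlen]
    split_ifs with hgt
    · -- pass 1
      have h1 := foldl_sim (fun (p : Array (Array Int) × Int) (q : List (List Int) × Int) =>
          sim p.1 = q.1 ∧ p.2 = q.2) (PySem.List.pyRange 1 x 1)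
        (fun p i =>
          ((p.1.modify i.toNat (fun r => r.modify 0 (fun v => v * p.2))).modify 0
            (fun r => r.modify i.toNat (fun v => v * p.2)), p.2 * 2))
        (fun p i =>
          ((p.1.modify i.toNat (fun r => r.modify 0 (fun v => v * p.2))).modify 0
            (fun r => r.modify i.toNat (fun v => v * p.2)), p.2 * 2))
        (by
          intro i _ u v huv
          refine ⟨?_, by simp [huv.2]⟩
          rw [sim_modify _ 0 _ _ (fun r => Array.toList_modify),
            sim_modify _ i.toNat _ _ (fun r => Array.toList_modify), huv.1, huv.2]
          rfl)
        (A, 2) (L, 2) ⟨hAL, rfl⟩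
      have hsize1 : ((PySem.List.pyRange 1 x 1).foldl
          (fun (p : Array (Array Int) × Int) i =>
            ((p.1.modify i.toNat (fun r => r.modify 0 (fun v => v * p.2))).modify 0
              (fun r => r.modify i.toNat (fun v => v * p.2)), p.2 * 2)) (A, 2)).1.size
          = A.size := by
        apply foldl_pres (fun (p : Array (Array Int) × Int) => p.1.size = A.size)
        · intro i u hu; simpa using hu
        · rfl
      -- pass 2
      have h2 := foldl_sim (fun (a : Array (Array Int)) (l : List (List Int)) =>
          sim a = l ∧ a.size = A.size) (PySem.List.pyRange 1 x 1)
        (fun a i => a.modify (a.size - 1)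
          (fun r => r.modify i.toNat (fun v => v * (r.getD (i - 1).toNat 0 * 2))))
        (fun a i => a.modify (a.length - 1)
          (fun r => r.modify i.toNat (fun v => v * (PySem.List.pyGetD r (i - 1) 0 * 2))))
        (by
          intro i hi u v huv
          have h1i : (1:Int) <= i := (PySem.List.mem_pyRange_one.mp hi).1
          refine ⟨?_, by simpa using huv.2⟩
          beta_reduce
          rw [<- huv.1, show (sim u).length = u.size from by simp [sim]]
          apply sim_modify
          intro r
          rw [Array.toList_modify]
          congr 1
          funext v'
          rw [arr_getD, PySem.List.pyGetD_of_nonneg _ _ (by omega)])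
        _ _ ⟨h1.1, hsize1⟩
      -- pass 3
      exact (foldl_sim (fun (a : Array (Array Int)) (l : List (List Int)) =>
          sim a = l ∧ a.size = A.size) (PySem.List.pyRange 1 (x - 1) 1)
        _ _
        (by
          intro i _ u v huv
          apply foldl_sim (fun (a : Array (Array Int)) (l : List (List Int)) =>
              sim a = l ∧ a.size = A.size) (PySem.List.pyRange 1 x 1)
          · intro j hj u v huv
            have h1j : (1:Int) <= j := (PySem.List.mem_pyRange_one.mp hj).1
            refine ⟨?_, by simpa using huv.2⟩
            beta_reduce
            rw [<- huv.1]
            apply sim_modify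
            intro r
            rw [Array.toList_modify]
            congr 1
            funext v'
            rw [arr_getD, PySem.List.pyGetD_of_nonneg _ _ (by omega)]
          · exact huv)
        _ _ h2).1
    · exact hAL
  have harr : sim (#[] ++ ((PySem.List.pyRange 0 x 1).foldl
      (fun nl i =>
        (PySem.List.pyRange 0 x 1).foldl (fun nl _j => nl.modify i.toNat (fun r => r.push 1))
          (nl.push #[]))
      #[]))
      = ([] : List (List Int)) ++ ((PySem.List.pyRange 0 x 1).foldl
      (fun nl i =>
        (PySem.List.pyRange 0 x 1).foldl (fun nl _j => nl.modify i.toNat (fun r => r ++ [1]))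
          (nl ++ [([] : List Int)]))
      []) := by
    rw [List.nil_append, <- hbuild]
    simp [sim]
  exact hsum _ _ harr


-- proof-only helpers: matrices as functions of their indices
def M (n : Nat) (f : Nat → Nat → Int) : List (List Int) :=
  (List.range n).map (fun i => (List.range n).map (f i))

theorem map_range_congr {α : Type} (n : Nat) (f g : Nat → α)
    (h : ∀ j, j < n → f j = g j) :
    (List.range n).map f = (List.range n).map g := by
  apply List.ext_getElem (by simp)
  intro i h1 h2
  simp only [List.getElem_map, List.getElem_range]
  exact h i (by simpa using h1)

theorem M_congr (n : Nat) (f g : Nat → Nat → Int)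
    (h : ∀ i j, i < n → j < n → f i j = g i j) : M n f = M n g := by
  apply map_range_congr
  intro i hi
  exact map_range_congr n _ _ (fun j hj => h i j hi hj)

theorem modify_map_range (n : Nat) (g : Nat → Int) (j0 : Nat) (F : Int → Int) :
    ((List.range n).map g).modify j0 F
      = (List.range n).map (fun j => if j = j0 then F (g j0) else g j) := by
  apply List.ext_getElem (by simp)
  intro i h1 h2
  simp only [List.getElem_modify, List.getElem_map, List.getElem_range]
  by_cases h : j0 = i
  · subst h; simp
  · rw [if_neg h, if_neg (fun hh => h hh.symm)]

theorem modify_M (n : Nat) (f : Nat → Nat → Int) (i0 : Nat) (hi : i0 < n)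
    (G : List Int → List Int) (g' : Nat → Int)
    (hG : G ((List.range n).map (f i0)) = (List.range n).map g') :
    (M n f).modify i0 G = M n (fun i => if i = i0 then g' else f i) := by
  apply List.ext_getElem (by simp [M])
  intro i h1 h2
  simp only [M, List.getElem_modify, List.getElem_map, List.getElem_range] at *
  split_ifs with h h' h'
  · subst h'; exact hG
  · omega
  · omega
  · rfl

theorem modify_modify {α : Type} (a : List α) (m : Nat) (f g : α → α) :
    (a.modify m f).modify m g = a.modify m (fun r => g (f r)) := by
  apply List.ext_getElem (by simp)
  intro i h1 h2
  simp only [List.getElem_modify]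
  split_ifs <;> rfl

theorem foldl_modify_fixed {α β : Type} (js : List β) (m : Nat) (g : β → List α → List α) :
    ∀ (a : List (List α)), js.foldl (fun a j => a.modify m (g j)) a
      = a.modify m (fun r => js.foldl (fun r j => g j r) r) := by
  induction js with
  | nil => intro a; exact (List.modify_id m a).symm
  | cons j js ih =>
    intro a
    simp only [List.foldl_cons]
    rw [ih, modify_modify]

theorem foldl_modify_len {β : Type} (js : List β) (g : β → List Int → List Int) (n : Nat) :
    ∀ (a : List (List Int)), a.length = n →
      js.foldl (fun a j => a.modify (a.length - 1) (g j)) a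
        = js.foldl (fun a j => a.modify (n - 1) (g j)) a := by
  induction js with
  | nil => intro a _; rfl
  | cons j js ih =>
    intro a h
    simp only [List.foldl_cons, h]
    exact ih _ (by simp [h])

theorem foldl_append_one {β : Type} (js : List β) : ∀ (r : List Int),
    js.foldl (fun r _ => r ++ [(1:Int)]) r = r ++ List.replicate js.length (1:Int) := by
  induction js with
  | nil => intro r; simp
  | cons j js ih =>
    intro r
    simp [ih, List.replicate_succ]

theorem modify_append_singleton {α : Type} (l : List α) (b : α) (f : α → α) :
    (l ++ [b]).modify l.length f = l ++ [f b] := by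
  induction l with
  | nil => simp
  | cons a l ih => simpa [List.modify_succ_cons] using ih

theorem modify_append_singleton' {α : Type} (l : List α) (b : α) (f : α → α) (k : Nat)
    (hk : k = l.length) : (l ++ [b]).modify k f = l ++ [f b] := by
  subst hk; exact modify_append_singleton l b f

-- the matrix of ones produced by A's build loops
theorem build_aux (n : Nat) : ∀ (m : Nat),
    (List.range m).foldl (fun nl k =>
      ((List.range n).map (fun (k : Nat) => (k : Int))).foldl
        (fun nl _ => nl.modify k (fun r => r ++ [(1:Int)])) (nl ++ [[]]))
      []
      = List.replicate m ((List.range n).map (fun _ => (1:Int))) := by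
  intro m
  induction m with
  | zero => rfl
  | succ m ih =>
    rw [List.range_succ, List.foldl_append, ih]
    simp only [List.foldl_cons, List.foldl_nil]
    rw [foldl_modify_fixed]
    have hlen : (List.replicate m ((List.range n).map (fun _ => (1:Int)))).length = m := by simp
    rw [modify_append_singleton' _ _ _ m hlen.symm, foldl_append_one]
    have : ([] : List Int) ++ List.replicate ((List.range n).map (fun (k : Nat) => (k : Int))).length 1
        = (List.range n).map (fun _ => (1:Int)) := by
      simp
    rw [this, ← List.replicate_succ']

theorem replicate_eq_M (n : Nat) :
    List.replicate n ((List.range n).map (fun _ => (1:Int))) = M n (fun _ _ => 1) := by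
  apply List.ext_getElem (by simp [M])
  intro i h1 h2
  simp [M]

-- one propagation pass along a row seeded with v at position 0
theorem rowfold_aux (n : Nat) (v : Int) : ∀ (m : Nat), m ≤ n - 1 → 1 ≤ n →
    (List.range m).foldl
      (fun r c => r.modify (1 + c) (fun w => w * (r.getD c 0 * 2)))
      ((List.range n).map (fun j => if j = 0 then v else 1))
      = (List.range n).map (fun j => if j ≤ m then v * 2 ^ j else 1) := by
  intro m
  induction m with
  | zero =>
    intro _ _
    apply map_range_congr
    intro j hj
    rcases Nat.eq_zero_or_pos j with h | h <;> simp [h] <;> omega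
  | succ m ih =>
    intro hm hn
    rw [List.range_succ, List.foldl_append, ih (by omega) hn]
    simp only [List.foldl_cons, List.foldl_nil]
    rw [List.getD_eq_getElem?_getD]
    rw [List.getElem?_eq_getElem (by simp; omega)]
    simp only [List.getElem_map, List.getElem_range, Option.getD_some]
    rw [modify_map_range]
    apply map_range_congr
    intro j hj
    split_ifs <;> first | rfl | omega | (subst_vars; first | rfl | omega | ring | (simp only [one_mul, mul_one, ← pow_add]; first | rfl | omega | ring | (congr 1; omega)))

-- result of A's first pass (k-doublings into row 0 and column 0), after m steps
def f1 (m : Nat) (i j : Nat) : Int :=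
  if i = 0 then (if j ≤ m then 2 ^ j else 1)
  else if j = 0 ∧ i ≤ m then 2 ^ i else 1

theorem stage1_aux (n : Nat) (hn : 2 ≤ n) : ∀ (m : Nat), m ≤ n - 1 →
    (List.range m).foldl (fun (p : List (List Int) × Int) (c : Nat) =>
        ((p.1.modify (1 + c) (fun r => r.modify 0 (fun v => v * p.2))).modify 0
            (fun r => r.modify (1 + c) (fun v => v * p.2)), p.2 * 2))
      (M n (fun _ _ => 1), 2)
      = (M n (f1 m), 2 ^ (m + 1)) := by
  intro m
  induction m with
  | zero =>
    intro _
    refine Prod.ext ?_ (by norm_num)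
    apply M_congr
    intro i j hi hj
    simp only [f1]
    split_ifs <;> simp_all <;> omega
  | succ m ih =>
    intro hm
    rw [List.range_succ, List.foldl_append, ih (by omega)]
    simp only [List.foldl_cons, List.foldl_nil]
    refine Prod.ext ?_ (by ring)
    simp only
    rw [modify_M n (f1 m) (1 + m) (by omega)
      (g' := fun j => if j = 0 then (2:Int) ^ (m + 1) else 1)
      (G := fun r => r.modify 0 (fun v => v * 2 ^ (m + 1)))
      (by
        beta_reduce
        rw [modify_map_range]
        apply map_range_congr
        intro j hj
        simp only [f1]
        split_ifs <;> first | rfl | omega | (subst_vars; first | rfl | omega | ring | (simp only [one_mul, mul_one, ← pow_add]; first | rfl | omega | ring | (congr 1; omega))))]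
    rw [modify_M n _ 0 (by omega)
      (g' := fun j => if j ≤ m + 1 then (2:Int) ^ j else 1)
      (G := fun r => r.modify (1 + m) (fun v => v * 2 ^ (m + 1)))
      (by
        beta_reduce
        rw [if_neg (show ¬(0 = 1 + m) by omega)]
        rw [modify_map_range]
        apply map_range_congr
        intro j hj
        simp only [f1]
        split_ifs <;> first | rfl | omega | (subst_vars; first | rfl | omega | ring | (simp only [one_mul, mul_one, ← pow_add]; first | rfl | omega | ring | (congr 1; omega))))]
    apply M_congr
    intro i j hi hj
    simp only [ite_apply, f1]
    split_ifs <;> first | rfl | omega | (subst_vars; first | rfl | omega | ring | (simp only [one_mul, mul_one, ← pow_add]; first | rfl | omega | ring | (congr 1; omega)))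

-- after the second pass: last row fully propagated
def f2 (n : Nat) (i j : Nat) : Int :=
  if i = 0 then 2 ^ j
  else if i = n - 1 then 2 ^ (n - 1 + j)
  else if j = 0 then 2 ^ i else 1

-- after m steps of the third pass: interior rows 1..m fully propagated
def f3 (n m : Nat) (i j : Nat) : Int :=
  if i = 0 then 2 ^ j
  else if i = n - 1 then 2 ^ (n - 1 + j)
  else if i ≤ m then 2 ^ (i + j)
  else if j = 0 then 2 ^ i else 1

theorem stage3_aux (n : Nat) (hn : 2 ≤ n) : ∀ (m : Nat), m ≤ n - 2 →
    (List.range m).foldl (fun a c =>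
        a.modify (1 + c) (fun r =>
          (List.range (n - 1)).foldl
            (fun r c' => r.modify (1 + c') (fun w => w * (r.getD c' 0 * 2))) r))
      (M n (f2 n))
      = M n (f3 n m) := by
  intro m
  induction m with
  | zero =>
    intro _
    apply M_congr
    intro i j hi hj
    simp only [f2, f3]
    split_ifs <;> first | rfl | omega | (subst_vars; first | rfl | omega | ring | (simp only [one_mul, mul_one, ← pow_add]; first | rfl | omega | ring | (congr 1; omega)))
  | succ m ih =>
    intro hm
    rw [List.range_succ, List.foldl_append, ih (by omega)]
    simp only [List.foldl_cons, List.foldl_nil]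
    rw [modify_M n (f3 n m) (1 + m) (by omega)
      (g' := fun j => if j ≤ n - 1 then (2:Int) ^ (m + 1) * 2 ^ j else 1)
      (G := fun r => (List.range (n - 1)).foldl
            (fun r c' => r.modify (1 + c') (fun w => w * (r.getD c' 0 * 2))) r)
      (by
        beta_reduce
        have hrow : (List.range n).map (f3 n m (1 + m))
            = (List.range n).map (fun j => if j = 0 then (2:Int) ^ (m + 1) else 1) := by
          apply map_range_congr
          intro j hj
          simp only [ite_apply, f3]
          split_ifs <;> first | rfl | omega | (subst_vars; first | rfl | omega | ring | (simp only [one_mul, mul_one, ← pow_add]; first | rfl | omega | ring | (congr 1; omega)))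
        rw [hrow, rowfold_aux n (2 ^ (m + 1)) (n - 1) (by omega) (by omega)])]
    apply M_congr
    intro i j hi hj
    simp only [ite_apply, f3]
    split_ifs <;> first | rfl | omega | (subst_vars; first | rfl | omega | ring | (simp only [one_mul, mul_one, ← pow_add]; first | rfl | omega | ring | (congr 1; omega)))

-- final shape equals B's closed form
theorem f3_final (n : Nat) (hn : 2 ≤ n) :
    M n (f3 n (n - 2)) = M n (fun i j => 2 ^ (i + j)) := by
  apply M_congr
  intro i j hi hj
  simp only [ite_apply, f3]
  split_ifs <;> first | rfl | omega | (subst_vars; first | rfl | omega | ring | (simp only [one_mul, mul_one, ← pow_add]; first | rfl | omega | ring | (congr 1; omega)))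

theorem stage2_eq (n : Nat) (hn : 2 ≤ n) :
    (M n (f1 (n - 1))).modify (n - 1) (fun r =>
        (List.range (n - 1)).foldl
          (fun r c => r.modify (1 + c) (fun w => w * (r.getD c 0 * 2))) r)
      = M n (f2 n) := by
  rw [modify_M n (f1 (n - 1)) (n - 1) (by omega)
    (g' := fun j => if j ≤ n - 1 then (2:Int) ^ (n - 1) * 2 ^ j else 1)
    (G := fun r => (List.range (n - 1)).foldl
          (fun r c => r.modify (1 + c) (fun w => w * (r.getD c 0 * 2))) r)
    (by
      beta_reduce
      have hrow : (List.range n).map (f1 (n - 1) (n - 1))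
          = (List.range n).map (fun j => if j = 0 then (2:Int) ^ (n - 1) else 1) := by
        apply map_range_congr
        intro j hj
        simp only [ite_apply, f1]
        split_ifs <;> first | rfl | omega | (subst_vars; first | rfl | omega | ring | (simp only [one_mul, mul_one, ← pow_add]; first | rfl | omega | ring | (congr 1; omega)))
      rw [hrow, rowfold_aux n (2 ^ (n - 1)) (n - 1) (by omega) (by omega)])]
  apply M_congr
  intro i j hi hj
  simp only [ite_apply, f1, f2]
  split_ifs <;> first | rfl | omega | (subst_vars; first | rfl | omega | ring | (simp only [one_mul, mul_one, ← pow_add]; first | rfl | omega | ring | (congr 1; omega)))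

theorem toNat_one_add (c : Nat) : ((1:Int) + (c:Int)).toNat = 1 + c := by omega

theorem matA_eq (n : Nat) (hn : 2 ≤ n) :
    matL (n : Int) = M n (fun i j => 2 ^ (i + j)) := by
  simp only [matL]
  rw [PySem.List.pyRange_zero_natCast, List.foldl_map]
  simp only [Int.toNat_natCast, List.nil_append]
  rw [build_aux, replicate_eq_M]
  simp only [sum_interiorL]
  rw [if_pos (by simp [M]; omega)]
  -- pass 1
  have hr1 : PySem.List.pyRange 1 (n : Int) 1
      = (List.range (n - 1)).map (fun (k : Nat) => (1:Int) + (k : Int)) := by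
    rw [PySem.List.pyRange_one, show ((n:Int) - 1).toNat = n - 1 by omega]
  rw [hr1, List.foldl_map, List.foldl_map]
  have hbody1 : (fun (p : List (List Int) × Int) (c : Nat) =>
      ((p.1.modify ((1:Int) + (c:Int)).toNat (fun r => r.modify 0 fun v => v * p.2)).modify 0
          (fun r => r.modify ((1:Int) + (c:Int)).toNat fun v => v * p.2), p.2 * 2))
      = (fun (p : List (List Int) × Int) (c : Nat) =>
      ((p.1.modify (1 + c) (fun r => r.modify 0 fun v => v * p.2)).modify 0
          (fun r => r.modify (1 + c) fun v => v * p.2), p.2 * 2)) := by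
    funext p c
    rw [toNat_one_add]
  rw [hbody1, stage1_aux n hn (n - 1) (le_refl _)]
  -- pass 2
  have hfst : ((M n (f1 (n - 1)), (2:Int) ^ (n - 1 + 1)).1 : List (List Int))
      = M n (f1 (n - 1)) := rfl
  rw [hfst, foldl_modify_len _ _ n _ (by simp [M])]
  have hbody2 : (fun (r : List Int) (c : Nat) =>
      r.modify ((1:Int) + (c:Int)).toNat
        (fun v => v * (PySem.List.pyGetD r ((1:Int) + (c:Int) - 1) 0 * 2)))
      = (fun (r : List Int) (c : Nat) =>
      r.modify (1 + c) (fun w => w * (r.getD c 0 * 2))) := by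
    funext r c
    rw [toNat_one_add]
    have h1 : (1:Int) + (c:Int) - 1 = (c:Int) := by omega
    rw [h1, PySem.List.pyGetD_of_nonneg r 0 (by omega), Int.toNat_natCast]
  rw [foldl_modify_fixed]
  have hfix2 : (fun (r : List Int) =>
      (List.range (n-1)).foldl (fun r c =>
        r.modify ((1:Int) + (c:Int)).toNat
          (fun v => v * (PySem.List.pyGetD r ((1:Int) + (c:Int) - 1) 0 * 2))) r)
      = (fun (r : List Int) =>
      (List.range (n-1)).foldl (fun r c =>
        r.modify (1 + c) (fun w => w * (r.getD c 0 * 2))) r) := by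
    funext r
    rw [hbody2]
  rw [hfix2]
  rw [stage2_eq n hn]
  -- pass 3
  have hr3 : PySem.List.pyRange 1 ((n : Int) - 1) 1
      = (List.range (n - 2)).map (fun (k : Nat) => (1:Int) + (k : Int)) := by
    rw [PySem.List.pyRange_one, show ((n:Int) - 1 - 1).toNat = n - 2 by omega]
  rw [hr3, List.foldl_map]
  have hbody3 : (fun (a : List (List Int)) (c : Nat) =>
      ((List.range (n - 1)).map (fun (k : Nat) => (1:Int) + (k : Int))).foldl (fun a (j : Int) =>
        a.modify ((1:Int) + (c:Int)).toNat (fun r =>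
          r.modify j.toNat (fun v => v * (PySem.List.pyGetD r (j - 1) 0 * 2)))) a)
      = (fun (a : List (List Int)) (c : Nat) =>
      a.modify (1 + c) (fun r =>
        (List.range (n - 1)).foldl
          (fun r c' => r.modify (1 + c') (fun w => w * (r.getD c' 0 * 2))) r)) := by
    funext a c
    rw [List.foldl_map, toNat_one_add]
    rw [foldl_modify_fixed]
    congr 1
  rw [hbody3, stage3_aux n hn (n - 2) (le_refl _), f3_final n hn]

theorem matB_eq (n : Nat) :
    mat_alt (n : Int) = M n (fun i j => 2 ^ (i + j)) := by
  simp only [mat_alt, M]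
  rw [PySem.List.pyRange_zero_natCast, List.map_map]
  apply map_range_congr
  intro i hi
  simp only [Function.comp]
  rw [List.map_map]
  apply map_range_congr
  intro j hj
  show (2:Int) ^ ((i:Int) + (j:Int)).toNat = 2 ^ (i + j)
  rw [show ((i:Int) + (j:Int)).toNat = i + j by omega]

-- ===== VERDICT (by name: the statement is the Claim_ definition above) =====
theorem mat_spec : Claim_equal_mat := by
  intro x _
  show mat x = mat_alt x
  rw [mat_eq_matL]
  by_cases hx : x ≤ 0
  · simp [matL, mat_alt, sum_interiorL, PySem.List.pyRange_one_eq_nil hx]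
  · by_cases hx1 : x = 1
    · subst hx1; decide
    · have h2 : 2 ≤ x := by omega
      have hx' : x = (x.toNat : Int) := by omega
      rw [hx', matA_eq x.toNat (by omega), matB_eq x.toNat]
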